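-- pv_equiv track=rewrite | github.com/nitsas/codejamsolutions | Hall of Mirrors/runme.py | explode_hall_horizontally
-- ===== SOURCE A (Python) =====
-- def explode_hall_horizontally(hall, times, x_position):
--     result = []
--     width = len(hall[0])
--     for i, line in enumerate(hall):
--         result.append(line)
--         mirrored_line = line[::-1]
--         for k in range(times):
--             if k % 2:
--                 result[i] = line + result[i] + line
--             else:
--                 result[i] = mirrored_line + result[i] + mirrored_line
--     x_position = x_position[0], times * width + x_position[1]
--     return result, x_position
-- ===== SOURCE B (Python) =====
-- def explode_hall_horizontally(hall, times, x_position):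
--     width = len(hall[0])
--     q, r = divmod(max(times, 0), 2)
--     result = []
--     for line in hall:
--         mirrored = line[::-1]
--         pair_left = (line + mirrored) * q
--         pair_right = (mirrored + line) * q
--         if r:
--             result.append(mirrored + pair_left + line + pair_right + mirrored)
--         else:
--             result.append(pair_left + line + pair_right)
--     return result, (x_position[0], times * width + x_position[1])
-- ===== Notes on version B (the rewrite author's own statement) =====
-- stated objective: faster
-- what changed: Replaces the O(times)-step wrapping loop per line by a closed-form construction: the expanded line is built directly from (line+mirrored)*(times//2) blocks using // and % on times, with one even/odd case.
import Mathlib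
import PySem

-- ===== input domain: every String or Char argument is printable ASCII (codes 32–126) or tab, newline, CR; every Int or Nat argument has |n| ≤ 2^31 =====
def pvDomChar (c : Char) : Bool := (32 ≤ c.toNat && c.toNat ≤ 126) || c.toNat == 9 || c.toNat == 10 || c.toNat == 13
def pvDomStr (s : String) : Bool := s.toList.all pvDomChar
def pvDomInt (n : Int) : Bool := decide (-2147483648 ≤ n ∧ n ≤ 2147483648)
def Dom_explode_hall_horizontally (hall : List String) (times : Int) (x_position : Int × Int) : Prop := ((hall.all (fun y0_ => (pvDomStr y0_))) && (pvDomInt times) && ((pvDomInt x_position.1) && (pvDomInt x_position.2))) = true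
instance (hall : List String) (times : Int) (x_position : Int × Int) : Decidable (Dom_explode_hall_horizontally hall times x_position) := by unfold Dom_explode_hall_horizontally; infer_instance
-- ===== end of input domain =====

-- B replaces A's per-line O(times)-step wrapping loop by a closed-form block construction
-- ((line+mirrored)*(times//2) etc.), avoiding the repeated re-copying of the growing line (objective: faster).

-- ===== PORT A =====
def explode_hall_horizontally (hall : List String) (times : Int) (x_position : Int × Int) : List String × (Int × Int) :=
  match hall with
  | [] => ([], x_position)  -- hall[0] raises IndexError in Python; excluded by Pre_
  | h0 :: _ =>
    let width : Int := PySem.Str.len h0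
    let result : List String :=
      (PySem.List.enumerate hall 0).foldl (fun result p =>
        let i := p.1
        let line := p.2
        let result := result ++ [line]
        let mirrored_line : String :=
          String.ofList ((PySem.List.slice? line.toList none none (-1)).getD [])
        (PySem.List.pyRange 0 times 1).foldl (fun result k =>
          let cur := PySem.List.pyGetD result i ""
          if PySem.Int.mod k 2 ≠ 0 then
            result.set i.toNat (String.ofList (line.toList ++ cur.toList ++ line.toList))
          else
            result.set i.toNat (String.ofList (mirrored_line.toList ++ cur.toList ++ mirrored_line.toList)))
          result) []
    (result, (x_position.1, times * width + x_position.2))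

-- ===== PORT B =====
def explode_hall_horizontally_alt (hall : List String) (times : Int) (x_position : Int × Int) : List String × (Int × Int) :=
  match hall with
  | [] => ([], x_position)  -- len(hall[0]) raises IndexError in Python; excluded by Pre_
  | h0 :: _ =>
    let width : Int := PySem.Str.len h0
    let q : Int := PySem.Int.floordiv (max times 0) 2
    let r : Int := PySem.Int.mod (max times 0) 2
    let result : List String := hall.map (fun line =>
      let l := line.toList
      let mirrored := (PySem.List.slice? l none none (-1)).getD []
      let pair_left := PySem.List.pyRepeat (l ++ mirrored) q
      let pair_right := PySem.List.pyRepeat (mirrored ++ l) q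
      if r ≠ 0 then String.ofList (mirrored ++ pair_left ++ l ++ pair_right ++ mirrored)
      else String.ofList (pair_left ++ l ++ pair_right))
    (result, (x_position.1, times * width + x_position.2))

-- ===== PRECONDITION & SPEC =====
-- Pre_ excludes only the empty hall, on which Python A raises IndexError (hall[0]).
def Pre_explode_hall_horizontally (hall : List String) (times : Int) (x_position : Int × Int) : Prop := hall ≠ []
instance (hall : List String) (times : Int) (x_position : Int × Int) : Decidable (Pre_explode_hall_horizontally hall times x_position) := by unfold Pre_explode_hall_horizontally; infer_instance

def pvWitness_explode_hall_horizontally : List String × Int × (Int × Int) := (["ab", "c"], 3, (1, 2))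

def Spec_explode_hall_horizontally (hall : List String) (times : Int) (x_position : Int × Int) (out : List String × (Int × Int)) : Prop := out = explode_hall_horizontally_alt hall times x_position
instance (hall : List String) (times : Int) (x_position : Int × Int) (out : List String × (Int × Int)) : Decidable (Spec_explode_hall_horizontally hall times x_position out) := by unfold Spec_explode_hall_horizontally; infer_instance

-- ===== CLAIM (what is proved, stated in full; the proofs are below) =====
def Claim_equal_explode_hall_horizontally : Prop := ∀ (hall : List String) (times : Int) (x_position : Int × Int), Dom_explode_hall_horizontally hall times x_position → Pre_explode_hall_horizontally hall times x_position → Spec_explode_hall_horizontally hall times x_position (explode_hall_horizontally hall times x_position)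

-- ===== LEMMAS AND PROOFS =====

-- A's inner loop at char level: the k-th wrap of the accumulated line.
def pvCStep (l m : List Char) (k : Nat) (c : List Char) : List Char :=
  if k % 2 = 1 then l ++ c ++ l else m ++ c ++ m

-- the loop that repeatedly sets the last slot of result is an append of the folded value
theorem pvSetFold (ks : List Int) (g : Int → String → String) (r0 : List String) (s : String) :
    ks.foldl (fun res k =>
      res.set (((r0.length : Nat) : Int)).toNat (g k (PySem.List.pyGetD res ((r0.length : Nat) : Int) ""))) (r0 ++ [s])
    = r0 ++ [ks.foldl (fun acc k => g k acc) s] := by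
  induction ks generalizing s with
  | nil => rfl
  | cons k ks ih =>
    simp only [List.foldl_cons]
    rw [show PySem.List.pyGetD (r0 ++ [s]) ((r0.length : Nat) : Int) "" = s by
          simp [PySem.List.pyGetD_natCast],
        show (r0 ++ [s]).set (((r0.length : Nat) : Int)).toNat (g k s) = r0 ++ [g k s] by
          simp [List.set_append_right]]
    exact ih (g k s)

-- the outer enumerate-fold is a map, given that each step appends one wrapped line
theorem pvEnumFold (step : List String → (Int × String) → List String) (wrap : String → String)
    (hstep : ∀ (r0 : List String) (line : String), step r0 ((r0.length : Int), line) = r0 ++ [wrap line]) :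
    ∀ (xs : List String) (r0 : List String),
      (PySem.List.enumerate xs ((r0.length : Nat) : Int)).foldl step r0 = r0 ++ xs.map wrap := by
  intro xs
  induction xs with
  | nil => intro r0; simp [PySem.List.enumerate_nil]
  | cons x xs ih =>
    intro r0
    rw [PySem.List.enumerate_cons, List.foldl_cons, hstep r0 x]
    have h1 : ((r0.length : Int)) + 1 = (((r0 ++ [wrap x]).length : Nat) : Int) := by
      simp
    rw [h1, ih (r0 ++ [wrap x])]
    simp

-- the previous lemma specialised to the start the port uses
theorem pvEnumFold0 (step : List String → (Int × String) → List String) (wrap : String → String)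
    (hstep : ∀ (r0 : List String) (line : String), step r0 ((r0.length : Int), line) = r0 ++ [wrap line])
    (xs : List String) :
    (PySem.List.enumerate xs 0).foldl step [] = xs.map wrap := by
  have h := pvEnumFold step wrap hstep xs []
  rw [show ((([] : List String).length : Nat) : Int) = (0 : Int) by simp, List.nil_append] at h
  exact h

-- closed form of the wrapping recurrence, even number of wraps
theorem pvEven (l m : List Char) (q : Nat) :
    (List.range (2 * q)).foldl (fun c k => pvCStep l m k c) l
    = (List.replicate q (l ++ m)).flatten ++ l ++ (List.replicate q (m ++ l)).flatten := by
  induction q with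
  | zero => simp
  | succ q ih =>
    have h2 : 2 * (q + 1) = (2 * q + 1) + 1 := by omega
    rw [h2, List.range_succ, List.foldl_append, List.range_succ, List.foldl_append, ih]
    have hodd : (2 * q) % 2 = 0 := by omega
    have hodd2 : (2 * q + 1) % 2 = 1 := by omega
    simp only [List.foldl_cons, List.foldl_nil, pvCStep, hodd, hodd2]
    have hA : (List.replicate (q + 1) (l ++ m)).flatten = (l ++ m) ++ (List.replicate q (l ++ m)).flatten := by
      rw [List.replicate_succ]; simp
    have hB : (List.replicate (q + 1) (m ++ l)).flatten = (List.replicate q (m ++ l)).flatten ++ (m ++ l) := by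
      rw [List.replicate_succ']; simp
    rw [hA, hB]
    simp

-- closed form, odd number of wraps
theorem pvOdd (l m : List Char) (q : Nat) :
    (List.range (2 * q + 1)).foldl (fun c k => pvCStep l m k c) l
    = m ++ ((List.replicate q (l ++ m)).flatten ++ l ++ (List.replicate q (m ++ l)).flatten) ++ m := by
  rw [List.range_succ, List.foldl_append, pvEven]
  have hev : (2 * q) % 2 = 0 := by omega
  simp [pvCStep, hev]

-- A's per-line string-level wrap equals B's per-line closed form
theorem pvLine (line : String) (times : Int) :
    (PySem.List.pyRange 0 times 1).foldl (fun acc k =>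
      if PySem.Int.mod k 2 ≠ 0 then
        String.ofList (line.toList ++ acc.toList ++ line.toList)
      else
        String.ofList ((String.ofList ((PySem.List.slice? line.toList none none (-1)).getD [])).toList
          ++ acc.toList
          ++ (String.ofList ((PySem.List.slice? line.toList none none (-1)).getD [])).toList)) line
    = (let l := line.toList
       let mirrored := (PySem.List.slice? l none none (-1)).getD []
       let pair_left := PySem.List.pyRepeat (l ++ mirrored) (PySem.Int.floordiv (max times 0) 2)
       let pair_right := PySem.List.pyRepeat (mirrored ++ l) (PySem.Int.floordiv (max times 0) 2)
       if PySem.Int.mod (max times 0) 2 ≠ 0 then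
         String.ofList (mirrored ++ pair_left ++ l ++ pair_right ++ mirrored)
       else String.ofList (pair_left ++ l ++ pair_right)) := by
  simp only [PySem.List.slice?_none_none_neg_one, Option.getD_some, String.toList_ofList]
  set l := line.toList with hl
  set m := l.reverse with hm
  -- move the whole accumulation to char level
  have hline : line = String.ofList l := by rw [hl, String.ofList_toList]
  have hmax : max times 0 = ((times.toNat : Nat) : Int) := by omega
  have hrange : PySem.List.pyRange 0 times 1 = (List.range times.toNat).map (fun k => ((k : Nat) : Int)) := by
    rw [PySem.List.pyRange_one]
    simp
  rw [hrange, List.foldl_map]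
  have hstep : ∀ (acc : String) (k : Nat),
      (if PySem.Int.mod ((k : Nat) : Int) 2 ≠ 0 then
        String.ofList (l ++ acc.toList ++ l)
      else String.ofList (m ++ acc.toList ++ m))
      = String.ofList (pvCStep l m k acc.toList) := by
    intro acc k
    rw [show PySem.Int.mod ((k : Nat) : Int) 2 = ((k % 2 : Nat) : Int) from PySem.Int.mod_natCast k 2]
    by_cases hk : k % 2 = 1
    · rw [hk]; simp [pvCStep, hk]
    · have hk0 : k % 2 = 0 := by omega
      rw [hk0]; simp [pvCStep, hk0]
  have hof : ∀ (ks : List Nat) (s0 : List Char),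
      ks.foldl (fun acc k =>
        if PySem.Int.mod ((k : Nat) : Int) 2 ≠ 0 then
          String.ofList (l ++ acc.toList ++ l)
        else String.ofList (m ++ acc.toList ++ m)) (String.ofList s0)
      = String.ofList (ks.foldl (fun c k => pvCStep l m k c) s0) := by
    intro ks
    induction ks with
    | nil => intro s0; rfl
    | cons k ks ih =>
      intro s0
      rw [List.foldl_cons, List.foldl_cons, hstep, String.toList_ofList, ih]
  rw [hline, hof]
  -- evaluate the Python // and % on the clamped repetition count
  have hq : PySem.Int.floordiv (max times 0) 2 = ((times.toNat / 2 : Nat) : Int) := by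
    rw [hmax]; exact_mod_cast PySem.Int.floordiv_natCast times.toNat 2
  have hr : PySem.Int.mod (max times 0) 2 = ((times.toNat % 2 : Nat) : Int) := by
    rw [hmax]; exact_mod_cast PySem.Int.mod_natCast times.toNat 2
  have hqn : (PySem.Int.floordiv (max times 0) 2).toNat = times.toNat / 2 := by
    rw [hq]; exact Int.toNat_natCast _
  have hrepL : PySem.List.pyRepeat (l ++ m) (PySem.Int.floordiv (max times 0) 2)
      = (List.replicate (times.toNat / 2) (l ++ m)).flatten := by
    simp only [PySem.List.pyRepeat, hqn]
  have hrepR : PySem.List.pyRepeat (m ++ l) (PySem.Int.floordiv (max times 0) 2)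
      = (List.replicate (times.toNat / 2) (m ++ l)).flatten := by
    simp only [PySem.List.pyRepeat, hqn]
  by_cases hpar : times.toNat % 2 = 1
  · have hn : times.toNat = 2 * (times.toNat / 2) + 1 := by omega
    rw [hn, pvOdd]
    rw [if_pos (by rw [hr]; simp [hpar]), hrepL, hrepR]
    simp
  · have hp0 : times.toNat % 2 = 0 := by omega
    have hn : times.toNat = 2 * (times.toNat / 2) := by omega
    rw [hn, pvEven]
    rw [if_neg (by rw [hr]; simp [hp0]), hrepL, hrepR]

-- ===== VERDICT (by name: the statement is the Claim_ definition above) =====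
theorem explode_hall_horizontally_spec : Claim_equal_explode_hall_horizontally := by
  intro hall times x_position _hdom hpre
  unfold Spec_explode_hall_horizontally
  match hall with
  | [] => exact absurd rfl hpre
  | h0 :: t =>
    unfold explode_hall_horizontally explode_hall_horizontally_alt
    simp only
    congr 1
    -- the result lists: A's enumerate/set loop is a map of the per-line wrap
    rw [pvEnumFold0 _
      (fun line => (PySem.List.pyRange 0 times 1).foldl (fun acc k =>
        if PySem.Int.mod k 2 ≠ 0 then
          String.ofList (line.toList ++ acc.toList ++ line.toList)
        else
          String.ofList ((String.ofList ((PySem.List.slice? line.toList none none (-1)).getD [])).toList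
            ++ acc.toList
            ++ (String.ofList ((PySem.List.slice? line.toList none none (-1)).getD [])).toList)) line)
      ?_ (h0 :: t)]
    · refine List.map_congr_left ?_
      intro line _
      exact pvLine line times
    · intro r0 line
      dsimp only
      refine Eq.trans (PySem.List.foldl_congr_mem _ _ _ _ ?_)
        (pvSetFold (PySem.List.pyRange 0 times 1)
          (fun k cur =>
            if PySem.Int.mod k 2 ≠ 0 then
              String.ofList (line.toList ++ cur.toList ++ line.toList)
            else
              String.ofList ((String.ofList ((PySem.List.slice? line.toList none none (-1)).getD [])).toList
                ++ cur.toList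
                ++ (String.ofList ((PySem.List.slice? line.toList none none (-1)).getD [])).toList))
          r0 line)
      intro acc k _
      exact (apply_ite (fun v => acc.set (((r0.length : Nat) : Int)).toNat v) _ _ _).symm
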